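-- pv_equiv track=rewrite | github.com/Ashim986/LeetPulseTestGenerator | Scripts/generate_tests.py | _break_swift_string
-- ===== SOURCE A (Python) =====
-- def _break_swift_string(escaped: str, indent: str, max_len: int = 140) -> str:
--     """Return a Swift string literal, breaking long strings across lines.
--
--     If the string (including quotes) is shorter than max_len, returns a plain
--     quoted string. Otherwise, breaks into multiple concatenated strings.
--     Escape-sequence-aware: never splits inside \\", \\n, \\t, \\\\, etc.
--     """
--     if len(escaped) + 2 <= max_len:
--         return f'"{escaped}"'
--     # Break into chunks, respecting escape sequences
--     chunk_target = max_len - 4  # account for quotes and " +"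
--     parts: list[str] = []
--     i = 0
--     while i < len(escaped):
--         end = min(i + chunk_target, len(escaped))
--         # If we're not at the end, make sure we don't split an escape sequence
--         if end < len(escaped):
--             # Walk back if we landed inside an escape sequence
--             # An escape sequence starts with \ and is followed by one char
--             # (or \u{XXXX} for unicode). Check if position end-1 is a backslash
--             # that starts an escape, or if we're in the middle of one.
--             # Simple approach: find a safe split point by scanning forward from i
--             safe_end = i
--             pos = i
--             while pos < end and pos < len(escaped):
--                 if escaped[pos] == '\\' and pos + 1 < len(escaped):
--                     # This is an escape sequence — include the whole thing
--                     if escaped[pos + 1] == 'u' and pos + 2 < len(escaped) and escaped[pos + 2] == '{':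
--                         # Unicode escape \u{XXXX} — find closing brace
--                         brace_end = escaped.find('}', pos + 3)
--                         if brace_end != -1:
--                             pos = brace_end + 1
--                         else:
--                             pos += 2
--                     else:
--                         # Two-char escape: \", \\, \n, \t, \r, \0, etc.
--                         pos += 2
--                 else:
--                     pos += 1
--                 # Update safe_end if we haven't exceeded chunk target
--                 if pos - i <= chunk_target:
--                     safe_end = pos
--             if safe_end <= i:
--                 # Edge case: single escape sequence longer than chunk_target
--                 safe_end = pos
--             end = safe_end
--         else:
--             end = len(escaped)
--         parts.append(f'"{escaped[i:end]}"')
--         i = end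
--     return f"\n{indent}+ ".join(parts)
-- ===== SOURCE B (Python) =====
-- def _break_swift_string(escaped: str, indent: str, max_len: int = 140) -> str:
--     """Tokenize-then-pack re-implementation: one pass builds escape-safe atoms,
--     a second greedy pass packs them into chunks."""
--     if len(escaped) + 2 <= max_len:
--         return f'"{escaped}"'
--     chunk_target = max_len - 4
--     n = len(escaped)
--     # Pass 1: split into atoms (whole escape sequences or single chars).
--     atoms = []
--     i = 0
--     while i < n:
--         if escaped[i] == '\\' and i + 1 < n:
--             if escaped[i + 1] == 'u' and i + 2 < n and escaped[i + 2] == '{':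
--                 close = escaped.find('}', i + 3)
--                 j = close + 1 if close != -1 else i + 2
--             else:
--                 j = i + 2
--         else:
--             j = i + 1
--         atoms.append(escaped[i:j])
--         i = j
--     # Pass 2: greedily pack whole atoms into chunks of at most chunk_target chars
--     # (always at least one atom per chunk).
--     parts = []
--     k = 0
--     m = len(atoms)
--     while k < m:
--         size = len(atoms[k])
--         start = k
--         k += 1
--         while k < m and size + len(atoms[k]) <= chunk_target:
--             size += len(atoms[k])
--             k += 1
--         parts.append('"' + ''.join(atoms[start:k]) + '"')
--     return f"\n{indent}+ ".join(parts)
-- ===== Notes on version B (the rewrite author's own statement) =====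
-- stated objective: simpler
-- what changed: A interleaves chunking with a per-chunk forward re-scan that tracks a safe split point; B first tokenizes the string once into escape-safe atoms and then greedily packs whole atoms into chunks, so the safe-split bookkeeping (safe_end/end/min) disappears.
import Mathlib
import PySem

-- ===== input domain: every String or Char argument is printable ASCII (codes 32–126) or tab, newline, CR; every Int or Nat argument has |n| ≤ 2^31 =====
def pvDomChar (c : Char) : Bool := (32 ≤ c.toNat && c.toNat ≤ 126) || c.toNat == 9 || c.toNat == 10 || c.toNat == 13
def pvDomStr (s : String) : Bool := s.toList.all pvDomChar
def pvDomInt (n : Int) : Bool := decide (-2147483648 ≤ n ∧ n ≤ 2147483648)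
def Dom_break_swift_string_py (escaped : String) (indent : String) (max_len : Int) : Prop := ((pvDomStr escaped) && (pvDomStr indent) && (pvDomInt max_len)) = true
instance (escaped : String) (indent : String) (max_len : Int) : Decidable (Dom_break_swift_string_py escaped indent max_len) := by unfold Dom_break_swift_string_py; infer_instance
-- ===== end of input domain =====

-- B replaces A's chunk loop with its inner safe-split re-scan by a one-pass tokenization
-- into escape-safe atoms followed by greedy packing of whole atoms (objective: simpler).

-- ===== PORT A =====
-- escaped.find('}', k) for a nonneg start k: absolute index of the first '}' at
-- position ≥ k, none standing for Python's -1 (exact: drop clamps like a slice bound).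
def pyFindFrom (s : List Char) (c : Char) (k : Nat) : Option Nat :=
  ((s.drop k).idxOf? c).map (· + k)

-- one step of A's inner scan: the position after the escape sequence / char at pos
-- (A's if/else ladder in the same order; s[pos]? is exact: pos is a Nat here)
def innerStep (s : List Char) (pos : Nat) : Nat :=
  if s[pos]? = some '\\' ∧ pos + 1 < s.length then
    if s[pos+1]? = some 'u' ∧ pos + 2 < s.length ∧ s[pos+2]? = some '{' then
      match pyFindFrom s '}' (pos+3) with
      | some braceEnd => braceEnd + 1
      | none => pos + 2
    else pos + 2
  else pos + 1

theorem innerStep_gt (s : List Char) (pos : Nat) : pos < innerStep s pos := by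
  unfold innerStep pyFindFrom
  split
  · split
    · rcases h : ((s.drop (pos+3)).idxOf? '}').map (· + (pos+3)) with _ | braceEnd
      · simp only [h]; omega
      · simp only [h]
        rcases Option.map_eq_some_iff.mp h with ⟨j, _, hj⟩
        omega
    · omega
  · omega

-- A's inner while loop; state (pos, safe_end)
def innerLoop (s : List Char) (ct : Int) (i : Nat) (endI : Int) (pos safe : Nat) : Nat × Nat :=
  if h : (pos : Int) < endI ∧ pos < s.length then
    let pos' := innerStep s pos
    let safe' := if (pos' : Int) - (i : Int) ≤ ct then pos' else safe
    innerLoop s ct i endI pos' safe'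
  else (pos, safe)
termination_by s.length - pos
decreasing_by exact Nat.sub_lt_sub_left h.2 (innerStep_gt s pos)

-- A's outer while loop (fuel-driven; fuel = len+1 suffices on Pre_)
def outerLoop (s : List Char) (ct : Int) (fuel i : Nat) : List String :=
  match fuel with
  | 0 => []
  | fuel + 1 =>
    if i < s.length then
      let end0 : Int := min ((i : Int) + ct) (s.length : Int)
      let e : Nat :=
        if end0 < (s.length : Int) then
          let r := innerLoop s ct i end0 i i
          if r.2 ≤ i then r.1 else r.2
        else s.length
      ("\"" ++ String.ofList ((s.drop i).take (e - i)) ++ "\"") :: outerLoop s ct fuel e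
    else []

def break_swift_string_py (escaped : String) (indent : String) (max_len : Int) : String :=
  let s := escaped.toList
  if (s.length : Int) + 2 ≤ max_len then "\"" ++ escaped ++ "\""
  else
    String.intercalate ("\n" ++ indent ++ "+ ")
      (outerLoop s (max_len - 4) (s.length + 1) 0)

-- ===== PORT B =====
-- length of the atom (whole escape sequence or single char) at the head of the suffix
def atomLenB : List Char → Nat
  | [] => 0
  | [_] => 1
  | c :: d :: rest =>
    if c = '\\' then
      if d = 'u' ∧ rest.head? = some '{' then
        match (rest.drop 1).idxOf? '}' with   -- escaped.find('}', i+3), relative to the suffix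
        | some j => j + 4
        | none => 2
      else 2
    else 1

theorem atomLenB_pos (t : List Char) (h : t ≠ []) : 1 ≤ atomLenB t := by
  match t with
  | [] => simp at h
  | [_] => simp [atomLenB]
  | c :: d :: rest =>
    simp only [atomLenB]
    split
    · split
      · rcases (rest.drop 1).idxOf? '}' with _ | j <;> simp
      · omega
    · omega

-- pass 1: the atom list of a string
def atomsB (s : List Char) : List (List Char) :=
  if h : s = [] then [] else
    s.take (atomLenB s) :: atomsB (s.drop (atomLenB s))
termination_by s.length
decreasing_by
  have h1 := atomLenB_pos s h
  have h2 : s.length ≠ 0 := by simpa using h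
  simp only [List.length_drop]; omega

-- pass 2: greedy grouping of whole atoms into one chunk; size tracks the running
-- character count, the group is joined (flattened) by the caller
def packChunkB (ct : Int) (size : Nat) (acc : List (List Char)) : List (List Char) → List (List Char) × List (List Char)
  | [] => (acc, [])
  | a :: rest =>
    if (size : Int) + (a.length : Int) ≤ ct then packChunkB ct (size + a.length) (acc ++ [a]) rest
    else (acc, a :: rest)

theorem packChunkB_snd_length (ct : Int) (size : Nat) (acc : List (List Char)) (l : List (List Char)) :
    (packChunkB ct size acc l).2.length ≤ l.length := by
  induction l generalizing size acc with
  | nil => simp [packChunkB]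
  | cons a rest ih =>
    simp only [packChunkB]
    split
    · exact le_trans (ih _ _) (by simp)
    · simp

def packB (ct : Int) : List (List Char) → List (List Char)
  | [] => []
  | a :: rest =>
    let r := packChunkB ct a.length [a] rest
    r.1.flatten :: packB ct r.2
termination_by l => l.length
decreasing_by
  have := packChunkB_snd_length ct a.length [a] rest
  simpa using Nat.lt_succ_of_le this

def break_swift_string_py_alt (escaped : String) (indent : String) (max_len : Int) : String :=
  let s := escaped.toList
  if (s.length : Int) + 2 ≤ max_len then "\"" ++ escaped ++ "\""
  else
    String.intercalate ("\n" ++ indent ++ "+ ")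
      ((packB (max_len - 4) (atomsB s)).map (fun c => "\"" ++ String.ofList c ++ "\""))

-- ===== PRECONDITION & SPEC =====
-- Pre_ excludes only inputs on which A never returns: a nonempty string that needs
-- breaking with max_len ≤ 4 gives chunk_target = max_len - 4 ≤ 0, A's loop then takes
-- empty chunks forever and diverges; A returns normally on all of Pre_.
def Pre_break_swift_string_py (escaped : String) (indent : String) (max_len : Int) : Prop :=
  (escaped.length : Int) + 2 ≤ max_len ∨ 5 ≤ max_len ∨ escaped = ""

instance (escaped : String) (indent : String) (max_len : Int) : Decidable (Pre_break_swift_string_py escaped indent max_len) := by unfold Pre_break_swift_string_py; infer_instance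

def pvWitness_break_swift_string_py : String × String × Int := ("abc\\ndef\\tgh", "  ", 8)

def Spec_break_swift_string_py (escaped : String) (indent : String) (max_len : Int) (out : String) : Prop := out = break_swift_string_py_alt escaped indent max_len
instance (escaped : String) (indent : String) (max_len : Int) (out : String) : Decidable (Spec_break_swift_string_py escaped indent max_len out) := by unfold Spec_break_swift_string_py; infer_instance

-- ===== CLAIM (what is proved, stated in full; the proofs are below) =====
def Claim_equal_break_swift_string_py : Prop := ∀ (escaped : String) (indent : String) (max_len : Int), Dom_break_swift_string_py escaped indent max_len → Pre_break_swift_string_py escaped indent max_len → Spec_break_swift_string_py escaped indent max_len (break_swift_string_py escaped indent max_len)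

-- ===== LEMMAS AND PROOFS =====

theorem atomLenB_le (t : List Char) : atomLenB t ≤ t.length := by
  match t with
  | [] => simp [atomLenB]
  | [_] => simp [atomLenB]
  | c :: d :: rest =>
    simp only [atomLenB]
    split
    · split
      · next hcd =>
        obtain ⟨_, hr⟩ := hcd
        rcases rest with _ | ⟨x, rest2⟩
        · simp at hr
        · rcases hj : (List.drop 1 (x :: rest2)).idxOf? '}' with _ | j
          · simp
          · simp only [List.drop_succ_cons, List.drop_zero] at hj
            have := (List.idxOf?_eq_some_iff.mp hj).1
            simp; omega
      · simp
    · simp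

theorem atomsB_cons (t : List Char) (h : t ≠ []) :
    atomsB t = t.take (atomLenB t) :: atomsB (t.drop (atomLenB t)) := by
  rw [atomsB]; simp [h]

theorem flatten_atomsB (t : List Char) : (atomsB t).flatten = t := by
  induction t using atomsB.induct with
  | case1 => simp [atomsB]
  | case2 t h ih =>
    rw [atomsB_cons t h]
    simp [ih]

-- bridge: one step of A's inner scan consumes exactly the atom at pos
theorem innerStep_eq (s : List Char) (pos : Nat) (hpos : pos < s.length) :
    innerStep s pos = pos + atomLenB (s.drop pos) := by
  have hj : ∀ j, s[pos + j]? = (s.drop pos)[j]? := fun _ => List.getElem?_drop.symm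
  have hlen : (s.drop pos).length = s.length - pos := by simp
  rcases ht : s.drop pos with _ | ⟨c, t1⟩
  · exfalso; rw [ht] at hlen; simp at hlen; omega
  have h0 : s[pos]? = some c := by
    have := hj 0; rw [ht] at this; simpa using this
  unfold innerStep
  by_cases hc : c = '\\'
  · subst hc
    rcases t1 with _ | ⟨d, t2⟩
    · -- trailing lone backslash: a 1-char atom
      have hl1 : pos + 1 = s.length := by rw [ht] at hlen; simp at hlen; omega
      rw [if_neg (by rintro ⟨-, hlt⟩; omega)]
      simp [atomLenB]
    · have hl2 : s.length = pos + 2 + t2.length := by rw [ht] at hlen; simp at hlen; omega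
      have h1 : s[pos+1]? = some d := by have := hj 1; rw [ht] at this; simpa using this
      have h2 : s[pos+2]? = t2[0]? := by have := hj 2; rw [ht] at this; simpa using this
      rw [if_pos ⟨h0, by omega⟩]
      by_cases hdu : d = 'u' ∧ t2.head? = some '{'
      · obtain ⟨hd, hbr⟩ := hdu
        subst hd
        have ht20 : t2[0]? = some '{' := by rwa [← List.head?_eq_getElem?]
        have ht2ne : 0 < t2.length := by
          rcases t2 with _ | ⟨x, r⟩
          · simp at hbr
          · simp
        rw [if_pos ⟨h1, by omega, by rw [h2]; exact ht20⟩]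
        have hd3 : s.drop (pos+3) = t2.drop 1 := by
          have hdd : s.drop (pos + 3) = (s.drop pos).drop 3 := by rw [List.drop_drop]
          rw [hdd, ht]; rfl
        unfold pyFindFrom
        rw [hd3]
        simp only [atomLenB]
        rw [if_pos trivial, if_pos ⟨trivial, hbr⟩]
        rcases hfind : (t2.drop 1).idxOf? '}' with _ | j
        · simp [hfind]
        · simp [hfind]; omega
      · rw [if_neg ?hng]
        case hng =>
          rintro ⟨ha, hb, hc2⟩
          apply hdu
          refine ⟨by injection h1.symm.trans ha, ?_⟩
          rw [List.head?_eq_getElem?, ← h2, hc2]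
        simp only [atomLenB]
        rw [if_pos trivial, if_neg hdu]
  · -- ordinary character: a 1-char atom
    rw [if_neg (by rintro ⟨hh, -⟩; rw [h0] at hh; exact hc (by injection hh))]
    rcases t1 with _ | ⟨d, t2⟩
    · simp [atomLenB]
    · simp only [atomLenB]
      rw [if_neg hc]

-- chunk concatenation: s[i:pos] ++ s[pos:pos+a] = s[i:pos+a]
theorem take_chunk_append (s : List Char) (i pos a : Nat) (hip : i ≤ pos) :
    (s.drop i).take (pos - i) ++ (s.drop pos).take a = (s.drop i).take (pos + a - i) := by
  have h1 : pos + a - i = (pos - i) + a := by omega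
  rw [h1, List.take_add, List.drop_drop]
  have : i + (pos - i) = pos := by omega
  rw [this]

-- the inner while loop from a state pos=safe>i computes exactly B's greedy grouping
theorem inner_pack (s : List Char) (ct : Int) (i : Nat) (hend : (i : Int) + ct < (s.length : Int)) :
    ∀ k pos, s.length - pos ≤ k → i < pos → pos ≤ s.length → ((pos : Int) - (i : Int) ≤ ct) →
      ∃ F e grp, pos ≤ e ∧ e ≤ s.length ∧
        innerLoop s ct i ((i : Int) + ct) pos pos = (F, e) ∧
        (∀ acc : List (List Char),
          packChunkB ct (pos - i) acc (atomsB (s.drop pos)) = (acc ++ grp, atomsB (s.drop e))) ∧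
        grp.flatten = (s.drop pos).take (e - pos) := by
  intro k
  induction k with
  | zero => intro pos hk h1 h2 h3; omega
  | succ k ih =>
    intro pos hk hip hpn hct
    have hposn : pos < s.length := by
      have : (pos : Int) < s.length := by omega
      exact_mod_cast this
    have htne : s.drop pos ≠ [] := by
      intro hh; have := congrArg List.length hh; simp at this; omega
    set a := atomLenB (s.drop pos) with ha
    have ha1 : 1 ≤ a := atomLenB_pos _ htne
    have hale : a ≤ s.length - pos := by have := atomLenB_le (s.drop pos); simpa using this
    have hatoms : atomsB (s.drop pos)
        = (s.drop pos).take a :: atomsB (s.drop (pos + a)) := by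
      rw [atomsB_cons _ htne, ← ha, List.drop_drop]
    have hal : ((s.drop pos).take a).length = a := by simp; omega
    by_cases hstop : (pos : Int) = (i : Int) + ct
    · -- boundary exactly at chunk_target: loop exits, packing rejects the next atom
      refine ⟨pos, pos, [], le_refl _, by omega, ?_, ?_, by simp⟩
      · rw [innerLoop]; rw [dif_neg (by omega)]
      · intro acc
        rw [hatoms, packChunkB]
        rw [if_neg (by rw [hal]; push_cast; omega), ← hatoms]
        simp
    · have hlt : (pos : Int) < (i : Int) + ct := by omega
      have hstep : innerLoop s ct i ((i : Int) + ct) pos pos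
          = innerLoop s ct i ((i : Int) + ct) (pos + a)
              (if ((pos + a : Nat) : Int) - (i : Int) ≤ ct then pos + a else pos) := by
        rw [innerLoop]; rw [dif_pos ⟨hlt, hposn⟩]
        simp only [innerStep_eq s pos hposn, ← ha]
      by_cases hfit : ((pos + a : Nat) : Int) - (i : Int) ≤ ct
      · -- atom fits: recurse
        obtain ⟨F, e, grp, he1, he2, he3, he4, he5⟩ :=
          ih (pos + a) (by omega) (by omega) (by omega) (by push_cast at hfit ⊢; omega)
        refine ⟨F, e, (s.drop pos).take a :: grp, by omega, he2, ?_, ?_, ?_⟩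
        · rw [hstep, if_pos hfit]; exact he3
        · intro acc
          rw [hatoms, packChunkB]
          rw [if_pos (by rw [hal]; push_cast at hfit ⊢; omega)]
          have hsz : pos - i + ((s.drop pos).take a).length = pos + a - i := by
            rw [hal]; omega
          rw [hsz, he4 (acc ++ [(s.drop pos).take a])]
          simp
        · have : (s.drop pos).take a = (s.drop pos).take ((pos + a) - pos) := by
            congr 1; omega
          simp only [List.flatten_cons, he5, this]
          rw [take_chunk_append s pos (pos + a) (e - (pos + a)) (by omega)]
          congr 1; omega
      · -- atom overruns: safe_end keeps pos, loop exits next turn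
        refine ⟨pos + a, pos, [], le_refl _, by omega, ?_, ?_, by simp⟩
        · rw [hstep, if_neg hfit, innerLoop]
          rw [dif_neg (by push_cast at hfit ⊢; omega)]
        · intro acc
          rw [hatoms, packChunkB]
          rw [if_neg (by rw [hal]; push_cast at hfit ⊢; omega), ← hatoms]
          simp

-- a whole suffix that fits in ct is grouped into a single chunk
theorem packChunkB_all (ct : Int) : ∀ (l : List (List Char)) (size : Nat) (acc : List (List Char)),
    ((size : Int) + (l.flatten.length : Int) ≤ ct) →
    packChunkB ct size acc l = (acc ++ l, []) := by
  intro l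
  induction l with
  | nil => intro size acc h; simp [packChunkB]
  | cons a rest ih =>
    intro size acc h
    simp only [List.flatten_cons, List.length_append] at h
    rw [packChunkB, if_pos (by push_cast at h ⊢; omega)]
    rw [ih _ _ (by push_cast at h ⊢; omega)]
    simp

-- the outer loop from position i is B's packing of the atoms of the suffix at i
theorem outer_pack (s : List Char) (ct : Int) (hct : 1 ≤ ct) :
    ∀ fuel i, i ≤ s.length → s.length - i < fuel →
      outerLoop s ct fuel i
        = (packB ct (atomsB (s.drop i))).map (fun c => "\"" ++ String.ofList c ++ "\"") := by
  intro fuel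
  induction fuel with
  | zero => intro i h1 h2; omega
  | succ fuel ih =>
    intro i hin hfuel
    by_cases hi : i < s.length
    swap
    · have : i = s.length := by omega
      subst this
      rw [outerLoop, if_neg (by omega)]
      simp [atomsB, packB]
    · have htne : s.drop i ≠ [] := by
        intro hh; have := congrArg List.length hh; simp at this; omega
      set a := atomLenB (s.drop i) with ha
      have ha1 : 1 ≤ a := atomLenB_pos _ htne
      have hale : a ≤ s.length - i := by have := atomLenB_le (s.drop i); simpa using this
      have hatoms : atomsB (s.drop i)
          = (s.drop i).take a :: atomsB (s.drop (i + a)) := by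
        rw [atomsB_cons _ htne, ← ha, List.drop_drop]
      have hal : ((s.drop i).take a).length = a := by simp; omega
      rw [outerLoop, if_pos hi]
      simp only []
      by_cases hbig : (s.length : Int) ≤ (i : Int) + ct
      · -- tail fits: single final chunk, loop ends
        have hmin : min ((i : Int) + ct) (s.length : Int) = (s.length : Int) := by omega
        rw [hmin, if_neg (by omega)]
        have hflat : ((s.drop i).take a) ++ (atomsB (s.drop (i+a))).flatten = s.drop i := by
          have := flatten_atomsB (s.drop i)
          rw [hatoms] at this; simpa using this
        have hnat := congrArg List.length hflat
        rw [List.length_append, hal] at hnat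
        simp only [List.length_drop] at hnat
        have hpc : packChunkB ct ((s.drop i).take a).length [(s.drop i).take a] (atomsB (s.drop (i + a)))
            = ([(s.drop i).take a] ++ atomsB (s.drop (i + a)), []) := by
          rw [packChunkB_all ct _ _ _ (by rw [hal]; push_cast; omega)]
        rw [hatoms, packB]
        simp only [hpc, packB]
        have hfl : (([(s.drop i).take a] ++ atomsB (s.drop (i + a))).flatten) = s.drop i := by
          simpa using hflat
        rw [hfl, ih s.length (le_refl _) (by omega)]
        simp [atomsB, packB, List.take_of_length_le (by simp : (s.drop i).length ≤ s.length - i)]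
      · -- chunk boundary strictly inside: inner scan = greedy grouping
        have hmin : min ((i : Int) + ct) (s.length : Int) = (i : Int) + ct := by omega
        rw [hmin, if_pos (by omega)]
        -- first iteration of the inner loop by hand (pos = safe = i)
        have hstep : innerLoop s ct i ((i : Int) + ct) i i
            = innerLoop s ct i ((i : Int) + ct) (i + a)
                (if ((i + a : Nat) : Int) - (i : Int) ≤ ct then i + a else i) := by
          rw [innerLoop]; rw [dif_pos ⟨by omega, hi⟩]
          simp only [innerStep_eq s i hi, ← ha]
        by_cases hfit : ((i + a : Nat) : Int) - (i : Int) ≤ ct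
        · -- first atom fits: hand over to inner_pack at pos = i + a
          obtain ⟨F, e, grp, he1, he2, he3, he4, he5⟩ :=
            inner_pack s ct i (by omega) (s.length - (i + a)) (i + a) (le_refl _)
              (by omega) (by omega) (by push_cast at hfit ⊢; omega)
          rw [hstep, if_pos hfit, he3]
          have hre : ¬ (e ≤ i) := by omega
          rw [if_neg hre]
          have hsz : ((s.drop i).take a).length = (i + a) - i := by rw [hal]; omega
          have hpc := he4 [(s.drop i).take a]
          rw [hatoms, packB]
          simp only [hsz, hpc]
          have hched : ([(s.drop i).take a] ++ grp).flatten = (s.drop i).take (e - i) := by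
            have htka : (s.drop i).take a = (s.drop i).take ((i + a) - i) := by congr 1; omega
            simp only [List.flatten_append, List.flatten_cons, List.flatten_nil, he5, htka]
            rw [List.append_nil, take_chunk_append s i (i + a) (e - (i + a)) (by omega)]
            congr 1; omega
          rw [hched, ih e he2 (by omega), List.map_cons]
        · -- first atom alone overruns chunk_target: A takes it whole; so does B
          rw [hstep, if_neg hfit, innerLoop]
          rw [dif_neg (by push_cast at hfit ⊢; omega)]
          simp only [if_pos (le_refl i)]
          have hpc : packChunkB ct ((s.drop i).take a).length [(s.drop i).take a] (atomsB (s.drop (i + a)))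
              = ([(s.drop i).take a], atomsB (s.drop (i + a))) := by
            rcases hr : atomsB (s.drop (i + a)) with _ | ⟨b, rest⟩
            · simp [packChunkB]
            · rw [packChunkB, if_neg (by rw [hal]; push_cast at hfit ⊢; omega)]
          rw [hatoms, packB]
          simp only [hpc]
          have htake : (s.drop i).take ((i + a) - i) = (s.drop i).take a := by
            congr 1; omega
          rw [htake]
          have hfl1 : ([(s.drop i).take a] : List (List Char)).flatten = (s.drop i).take a := by simp
          rw [hfl1, ih (i + a) (by omega) (by omega), List.map_cons]

theorem main_equiv (escaped indent : String) (max_len : Int)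
    (hpre : Pre_break_swift_string_py escaped indent max_len) :
    break_swift_string_py escaped indent max_len = break_swift_string_py_alt escaped indent max_len := by
  unfold break_swift_string_py break_swift_string_py_alt
  simp only []
  by_cases hplain : ((escaped.toList.length : Int) + 2 ≤ max_len)
  · rw [if_pos hplain, if_pos hplain]
  · rw [if_neg hplain, if_neg hplain]
    rcases hpre with h | h | h
    · exfalso; apply hplain; simpa using h
    · congr 1
      have := outer_pack escaped.toList (max_len - 4) (by omega)
        (escaped.toList.length + 1) 0 (by omega) (by omega)
      simpa using this
    · subst h
      simp [outerLoop, atomsB, packB]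

-- ===== VERDICT (by name: the statement is the Claim_ definition above) =====
theorem break_swift_string_py_spec : Claim_equal_break_swift_string_py := by
  intro escaped indent max_len _ hpre
  exact main_equiv escaped indent max_len hpre
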